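-- pv_equiv track=rewrite | github.com/ye-kyaw-thu/AIE-F | assignment-submission/class-6/aung-hein-assignment-3/MM_HW_Recognition/nn_unit_wfst_from_chararray_pipeline.py | collapse_ctc_path
-- ===== SOURCE A (Python) =====
-- from typing import Dict, Iterable, List, Optional, Sequence, Tuple
--
-- def collapse_ctc_path(raw_path: Sequence[int], blank_idx: int = 0) -> Tuple[int, ...]:
--     seq = []
--     prev = None
--     for tok in raw_path:
--         if tok != blank_idx and tok != prev:
--             seq.append(int(tok))
--         prev = tok
--     return tuple(seq)
-- ===== SOURCE B (Python) =====
-- def collapse_ctc_path(raw_path, blank_idx=0):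
--     # Run-length decomposition: consume one whole run of equal tokens per
--     # outer step and emit its token unless it is the blank.
--     path = list(raw_path)
--     n = len(path)
--     out = []
--     i = 0
--     while i < n:
--         tok = path[i]
--         j = i
--         while j < n and path[j] == tok:
--             j += 1
--         if tok != blank_idx:
--             out.append(int(tok))
--         i = j
--     return tuple(out)
-- ===== Notes on version B (the rewrite author's own statement) =====
-- stated objective: alternative
-- what changed: Replaces the stateful prev-tracking scan with a recursive run-length decomposition: each step consumes a whole run of equal tokens and emits its token unless it is the blank, recursing on the remainder.
import Mathlib
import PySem

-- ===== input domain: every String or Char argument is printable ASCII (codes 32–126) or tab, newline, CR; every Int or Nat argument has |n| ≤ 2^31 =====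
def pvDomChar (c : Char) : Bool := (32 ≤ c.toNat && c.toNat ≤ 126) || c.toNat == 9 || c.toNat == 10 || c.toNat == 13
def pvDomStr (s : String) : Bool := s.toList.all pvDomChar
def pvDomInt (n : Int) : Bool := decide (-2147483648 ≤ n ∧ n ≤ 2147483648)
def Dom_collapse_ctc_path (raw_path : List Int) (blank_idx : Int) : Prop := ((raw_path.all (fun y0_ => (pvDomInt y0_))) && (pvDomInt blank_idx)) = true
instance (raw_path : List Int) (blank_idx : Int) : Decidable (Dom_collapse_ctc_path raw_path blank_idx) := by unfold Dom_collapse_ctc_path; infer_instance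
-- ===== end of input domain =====

-- B replaces A's stateful prev-tracking scan with a run-length decomposition
-- (alternative; same cost): each outer step consumes a whole run of equal
-- tokens and emits its token unless it is the blank.

-- ===== PORT A =====
-- stateful scan: state = (seq so far, prev token as Option Int; none = Python's None)
def collapse_ctc_path (raw_path : List Int) (blank_idx : Int) : List Int :=
  (raw_path.foldl
    (fun (st : List Int × Option Int) tok =>
      (if tok ≠ blank_idx ∧ some tok ≠ st.2 then st.1 ++ [tok] else st.1, some tok))
    ([], none)).1

-- ===== PORT B =====
-- outer while loop over runs; the inner while loop advancing past the run is dropWhile (== tok)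
def ctcRuns (blank_idx : Int) (l : List Int) (out : List Int) : List Int :=
  match l with
  | [] => out
  | tok :: rest =>
    ctcRuns blank_idx (rest.dropWhile (· == tok))
      (if tok ≠ blank_idx then out ++ [tok] else out)
termination_by l.length
decreasing_by
  have := List.length_dropWhile_le (· == tok) rest
  simp only [List.length_cons]; omega

def collapse_ctc_path_alt (raw_path : List Int) (blank_idx : Int) : List Int :=
  ctcRuns blank_idx raw_path []

-- ===== PRECONDITION & SPEC =====
def Spec_collapse_ctc_path (raw_path : List Int) (blank_idx : Int) (out : List Int) : Prop := out = collapse_ctc_path_alt raw_path blank_idx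
instance (raw_path : List Int) (blank_idx : Int) (out : List Int) : Decidable (Spec_collapse_ctc_path raw_path blank_idx out) := by unfold Spec_collapse_ctc_path; infer_instance

-- ===== CLAIM (what is proved, stated in full; the proofs are below) =====
def Claim_equal_collapse_ctc_path : Prop := ∀ (raw_path : List Int) (blank_idx : Int), Dom_collapse_ctc_path raw_path blank_idx → Spec_collapse_ctc_path raw_path blank_idx (collapse_ctc_path raw_path blank_idx)

-- ===== LEMMAS AND PROOFS =====

-- A's loop body, and its fold from an arbitrary state
def ctcStep (blank_idx : Int) (st : List Int × Option Int) (tok : Int) : List Int × Option Int :=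
  (if tok ≠ blank_idx ∧ some tok ≠ st.2 then st.1 ++ [tok] else st.1, some tok)

def ctcFold (blank_idx : Int) (l : List Int) (prev : Option Int) : List Int :=
  (l.foldl (ctcStep blank_idx) ([], prev)).1

theorem ctcFold_acc (blank_idx : Int) (l : List Int) (acc : List Int) (prev : Option Int) :
    (l.foldl (ctcStep blank_idx) (acc, prev)).1 = acc ++ ctcFold blank_idx l prev := by
  induction l generalizing acc prev with
  | nil => simp [ctcFold]
  | cons a t ih =>
    simp only [ctcFold, List.foldl_cons, ctcStep]
    by_cases h : a ≠ blank_idx ∧ some a ≠ prev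
    · simp only [if_pos h, ih]; simp
    · simp only [if_neg h, ih]; simp

-- unfolding rule for ctcFold
theorem ctcFold_cons (blank_idx a : Int) (t : List Int) (prev : Option Int) :
    ctcFold blank_idx (a :: t) prev
      = (if a ≠ blank_idx ∧ some a ≠ prev then [a] else []) ++ ctcFold blank_idx t (some a) := by
  simp only [ctcFold, List.foldl_cons, ctcStep]
  by_cases h : a ≠ blank_idx ∧ some a ≠ prev
  · simp only [if_pos h]; rw [ctcFold_acc]; simp [ctcFold]
  · simp only [if_neg h]; rw [ctcFold_acc]; simp [ctcFold]

-- with prev = some t, a leading run of t's is skipped by A's loop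
theorem ctcFold_dropRun (blank_idx t : Int) (l : List Int) :
    ctcFold blank_idx l (some t) = ctcFold blank_idx (l.dropWhile (· == t)) (some t) := by
  induction l with
  | nil => rfl
  | cons a r ih =>
    by_cases h : a = t
    · subst h
      rw [ctcFold_cons]
      have : ¬ (a ≠ blank_idx ∧ some a ≠ some a) := by simp
      simp [ih]
    · simp [h]

-- the accumulator of B's loop only collects output at the front
theorem ctcRuns_acc (blank_idx : Int) (l : List Int) (out : List Int) :
    ctcRuns blank_idx l out = out ++ ctcRuns blank_idx l [] := by
  induction hn : l.length using Nat.strong_induction_on generalizing l out with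
  | _ n ih =>
    cases l with
    | nil => simp [ctcRuns]
    | cons a t =>
      have hlt : (t.dropWhile (· == a)).length < n := by
        have := List.length_dropWhile_le (· == a) t
        simp only [List.length_cons] at hn; omega
      rw [ctcRuns, ctcRuns,
          ih _ hlt _ (if a ≠ blank_idx then out ++ [a] else out) rfl,
          ih _ hlt _ (if a ≠ blank_idx then ([] : List Int) ++ [a] else []) rfl]
      by_cases h : a = blank_idx <;> simp [h]

-- main invariant: A's fold equals B's run loop whenever prev differs from the head
theorem ctcFold_eq_alt (blank_idx : Int) (l : List Int) (prev : Option Int)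
    (h : ∀ a t, l = a :: t → prev ≠ some a) :
    ctcFold blank_idx l prev = ctcRuns blank_idx l [] := by
  induction hn : l.length using Nat.strong_induction_on generalizing l prev with
  | _ n ih =>
    cases l with
    | nil => simp [ctcFold, ctcRuns]
    | cons a t =>
      have ha : prev ≠ some a := h a t rfl
      have hlt : (t.dropWhile (· == a)).length < n := by
        have := List.length_dropWhile_le (· == a) t
        simp only [List.length_cons] at hn; omega
      rw [ctcFold_cons, ctcFold_dropRun,
          ih _ hlt _ (some a)
            (by intro b u hb he
                have hh := List.head?_dropWhile_not (· == a) t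
                rw [hb] at hh; simp at hh
                exact hh (Option.some.inj he).symm) rfl,
          ctcRuns]
      by_cases hb : a = blank_idx
      · simp [hb]
      · have : a ≠ blank_idx ∧ some a ≠ prev := ⟨hb, fun e => ha e.symm⟩
        simp only [if_pos this, if_pos hb]
        rw [List.nil_append, ctcRuns_acc blank_idx (List.dropWhile (fun x => x == a) t) [a]]

-- ===== VERDICT (by name: the statement is the Claim_ definition above) =====
theorem collapse_ctc_path_spec : Claim_equal_collapse_ctc_path := by
  intro raw_path blank_idx _
  unfold Spec_collapse_ctc_path collapse_ctc_path collapse_ctc_path_alt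
  exact ctcFold_eq_alt blank_idx raw_path none (by intro a t _; simp)
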